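-- pv_equiv track=rewrite | github.com/Yotterni/short_rna_structure_prediction | engine/R3FOLDp/.ipynb_checkpoints/R3FUtils-checkpoint.py | SeqToIdlist
-- ===== SOURCE A (Python) =====
-- def IntToChain(n):
--     """Ordered chain identifiers: A,B,...,z,AA,AB,...,zz"""
--     chars = 'ABCDEFGHIJKLMNOPQRSTUVWXYZ1234567890abcdefghijklmnopqrstuvwxyz'
--
--     if n < 0:
--         raise Exception("ERROR: negative input for IntToChain func")
--
--     if n < len(chars):
--         return ' '+chars[n]
--
--     if n > len(chars)**2 + len(chars) - 1:
--         raise Exception("ERROR: IntToChain cannot handle value {} > {}"\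
--                         .format(n,len(chars)**2 + len(chars) - 1))
--
--     return chars[(n // len(chars)) - 1] + chars[n % len(chars)]
--
-- def SeqToIdlist(seq):
--     """"Gg" -> ["1.A.G.1.", "1.A.G.2."]"""
--     cnt_asym  = 0
--     cnt_seq   = 1
--     cur_chain = IntToChain(cnt_asym).strip()
--
--     idlist = []
--
--     for base in seq:
--
--         idlist.append('.'.join(['1',          #Model
--                                 cur_chain,    #Chain
--                                 base.upper(), #Base
--                                 str(cnt_seq), #Residue id
--                                 '']))         #Ins.code
--         cnt_seq += 1
--
--         if base.islower():
--             cnt_asym += 1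
--             cur_chain = IntToChain(cnt_asym).strip()
--             cnt_seq = 1
--
--     return idlist
-- ===== SOURCE B (Python) =====
-- def SeqToIdlist(seq):
--     """"Gg" -> ["1.A.G.1.", "1.A.G.2."]"""
--     chars = 'ABCDEFGHIJKLMNOPQRSTUVWXYZ1234567890abcdefghijklmnopqrstuvwxyz'
--
--     # Split the sequence into chain segments: a lowercase base closes its segment.
--     segs = []
--     cur = []
--     for base in seq:
--         if base.islower():
--             segs.append(cur + [base])
--             cur = []
--         else:
--             cur.append(base)
--     if cur:
--         segs.append(cur)
--
--     def chain_id(j):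
--         return chars[j] if j < 62 else chars[j // 62 - 1] + chars[j % 62]
--
--     return ['.'.join(['1', chain_id(j), base.upper(), str(k), ''])
--             for j, seg in enumerate(segs)
--             for k, base in enumerate(seg, 1)]
-- ===== Notes on version B (the rewrite author's own statement) =====
-- stated objective: alternative
-- what changed: Replaces A's single character loop with mutable chain/residue counters and a fresh IntToChain+strip call after every lowercase base by a two-phase decomposition: first split the sequence into chain segments (a lowercase base closes its segment), then a doubly-indexed comprehension numbers residues within each segment and computes each chain id once, directly without the space-prefix-then-strip detour.
import Mathlib
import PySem

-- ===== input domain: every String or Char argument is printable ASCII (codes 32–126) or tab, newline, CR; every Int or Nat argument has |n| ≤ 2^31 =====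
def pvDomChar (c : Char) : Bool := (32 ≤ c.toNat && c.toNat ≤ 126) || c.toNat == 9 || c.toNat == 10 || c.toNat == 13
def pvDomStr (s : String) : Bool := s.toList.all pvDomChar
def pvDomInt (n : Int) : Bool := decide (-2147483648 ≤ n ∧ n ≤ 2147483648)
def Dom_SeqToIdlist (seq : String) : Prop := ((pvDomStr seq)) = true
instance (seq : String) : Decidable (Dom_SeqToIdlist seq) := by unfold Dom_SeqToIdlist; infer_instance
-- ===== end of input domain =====

-- B replaces A's single char-loop with mutable chain state by a split-into-segments pass
-- followed by a doubly-indexed comprehension (objective: alternative decomposition, same cost).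

-- ===== PORT A =====
def pyChars : String := "ABCDEFGHIJKLMNOPQRSTUVWXYZ1234567890abcdefghijklmnopqrstuvwxyz"

-- 'raise' is modelled by none (excluded by Pre_ below)
def IntToChain (n : Int) : Option String :=
  if n < 0 then none
  else if n < PySem.Str.len pyChars then
    match PySem.Str.pyGet? pyChars n with
    | some c => some (String.ofList [' ', c])
    | none => none
  else if n > PySem.Str.len pyChars ^ 2 + PySem.Str.len pyChars - 1 then none
  else
    match PySem.Str.pyGet? pyChars (PySem.Int.floordiv n (PySem.Str.len pyChars) - 1),
          PySem.Str.pyGet? pyChars (PySem.Int.mod n (PySem.Str.len pyChars)) with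
    | some a, some b => some (String.ofList [a, b])
    | _, _ => none

-- '.'.join(['1', chain, base.upper(), str(k), ''])
def pvEntry (chain : String) (b : Char) (k : Int) : String :=
  PySem.Str.join "." ["1", chain, String.ofList [PySem.Chars.upperChar b], PySem.Int.toStr k, ""]

def pvALoop : List Char → Int → Int → String → List String → List String
  | [], _, _, _, acc => acc
  | b :: rest, asym, cseq, chain, acc =>
    let acc' := acc ++ [pvEntry chain b cseq]
    if PySem.Chars.islower b then
      match IntToChain (asym + 1) with
      | some c => pvALoop rest (asym + 1) 1 (PySem.Str.strip c) acc'
      | none => acc'      -- A raises here; unreachable under Pre_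
    else
      pvALoop rest asym (cseq + 1) chain acc'

def SeqToIdlist (seq : String) : List String :=
  match IntToChain 0 with
  | some c => pvALoop seq.toList 0 1 (PySem.Str.strip c) []
  | none => []            -- unreachable: IntToChain 0 returns

-- ===== PORT B =====
-- chars[j] if j < 62 else chars[j // 62 - 1] + chars[j % 62]  ("" models the IndexError, outside Pre_)
def pvChainId (j : Int) : String :=
  if j < 62 then
    match PySem.Str.pyGet? pyChars j with
    | some c => String.ofList [c]
    | none => ""
  else
    match PySem.Str.pyGet? pyChars (PySem.Int.floordiv j 62 - 1),
          PySem.Str.pyGet? pyChars (PySem.Int.mod j 62) with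
    | some a, some b => String.ofList [a, b]
    | _, _ => ""

-- the segment-splitting loop of B (a lowercase base closes its segment)
def pvSegLoop : List Char → List Char → List (List Char) → List (List Char)
  | [], cur, segs => if cur.isEmpty then segs else segs ++ [cur]
  | b :: rest, cur, segs =>
    if PySem.Chars.islower b then pvSegLoop rest [] (segs ++ [cur ++ [b]])
    else pvSegLoop rest (cur ++ [b]) segs

def SeqToIdlist_alt (seq : String) : List String :=
  (PySem.List.enumerate (pvSegLoop seq.toList [] []) 0).flatMap
    (fun js => (PySem.List.enumerate js.2 1).map (fun kb => pvEntry (pvChainId js.1) kb.2 kb.1))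

-- ===== PRECONDITION & SPEC =====
-- Pre_ excludes sequences with at least 3906 lowercase letters, on which A's IntToChain raises
-- (its chain alphabet holds 62² + 62 = 3906 chain ids and A probes the NEXT chain after each lowercase base).
def Pre_SeqToIdlist (seq : String) : Prop :=
  seq.toList.countP (fun b => PySem.Chars.islower b) ≤ 3905
instance (seq : String) : Decidable (Pre_SeqToIdlist seq) := by unfold Pre_SeqToIdlist; infer_instance
def pvWitness_SeqToIdlist : String := "Gg"

def Spec_SeqToIdlist (seq : String) (out : List String) : Prop := out = SeqToIdlist_alt seq
instance (seq : String) (out : List String) : Decidable (Spec_SeqToIdlist seq out) := by unfold Spec_SeqToIdlist; infer_instance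

-- ===== CLAIM (what is proved, stated in full; the proofs are below) =====
def Claim_equal_SeqToIdlist : Prop := ∀ (seq : String), Dom_SeqToIdlist seq → Pre_SeqToIdlist seq → Spec_SeqToIdlist seq (SeqToIdlist seq)

-- ===== LEMMAS AND PROOFS =====

-- the common emission order, indexed by chain number j (Nat) and residue counter k
def pvEmit : List Char → Nat → Int → List String
  | [], _, _ => []
  | b :: rest, j, k =>
    pvEntry (pvChainId (j : Int)) b k ::
      (if PySem.Chars.islower b then pvEmit rest (j + 1) 1 else pvEmit rest j (k + 1))

set_option maxRecDepth 8192 in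
set_option maxHeartbeats 1000000 in
theorem pvChain_agree (j : Nat) (hj : j ≤ 3905) :
    (IntToChain (j : Int)).map PySem.Str.strip = some (pvChainId (j : Int)) := by
  by_cases h62 : j < 62
  · -- 62 small cases, fully concrete
    have : ∀ m : Fin 62, (IntToChain ((m : Nat) : Int)).map PySem.Str.strip
        = some (pvChainId ((m : Nat) : Int)) := by decide
    exact this ⟨j, h62⟩
  · -- two-character chain id: strip is the identity there
    have h62' : 62 ≤ j := Nat.le_of_not_lt h62
    have hlen : PySem.Str.len pyChars = 62 := by decide
    have hq1 : 1 ≤ j / 62 := (Nat.one_le_div_iff (by norm_num)).mpr h62'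
    have hqlt : j / 62 < 63 := (Nat.div_lt_iff_lt_mul (by norm_num)).mpr (by omega)
    have hrlt : j % 62 < 62 := Nat.mod_lt _ (by norm_num)
    have hq : PySem.Int.floordiv (j:Int) 62 = ((j / 62 : Nat) : Int) := by
      exact_mod_cast PySem.Int.floordiv_natCast j 62
    have hr : PySem.Int.mod (j:Int) 62 = ((j % 62 : Nat) : Int) := by
      exact_mod_cast PySem.Int.mod_natCast j 62
    have h1 : ((j / 62 : Nat) : Int) - 1 = ((j / 62 - 1 : Nat) : Int) := by push_cast [hq1]; ring
    have hlistlen : pyChars.toList.length = 62 := by decide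
    have hpow : ((62:Int)^2 + 62 - 1) = 3905 := by norm_num
    unfold IntToChain pvChainId
    rw [hlen, if_neg (show ¬ ((j:Int) < 0) by omega),
        if_neg (show ¬ ((j:Int) < 62) by omega),
        if_neg (show ¬ ((j:Int) > (62:Int)^2 + 62 - 1) by rw [gt_iff_lt, hpow]; omega),
        if_neg (show ¬ ((j:Int) < 62) by omega), hq, hr, h1]
    simp only [PySem.Str.pyGet?_natCast,
      List.getElem?_eq_getElem (show j / 62 - 1 < pyChars.toList.length by omega),
      List.getElem?_eq_getElem (show j % 62 < pyChars.toList.length by omega),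
      Option.map_some, Option.some.injEq]
    apply String.toList_inj.mp
    rw [PySem.Str.toList_strip]
    simp only [String.toList_ofList]
    have hnsb : pyChars.toList.all (fun c => !PySem.Chars.isspace c) = true := by decide
    have hns : ∀ c ∈ pyChars.toList, PySem.Chars.isspace c = false := by
      intro c hc
      simpa using List.all_eq_true.mp hnsb c hc
    have ha := hns _ (List.getElem_mem (show j / 62 - 1 < pyChars.toList.length by omega))
    have hb := hns _ (List.getElem_mem (show j % 62 < pyChars.toList.length by omega))
    simp [PySem.Chars.strip, PySem.Chars.lstrip, PySem.Chars.rstrip, ha, hb]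

-- the counter of lowercase bases still to come
def pvCntL (l : List Char) : Nat := l.countP (fun b => PySem.Chars.islower b)

theorem pvALoop_emit (l : List Char) : ∀ (j : Nat) (k : Int) (acc : List String),
    j + pvCntL l ≤ 3905 →
    pvALoop l (j : Int) k (pvChainId (j : Int)) acc = acc ++ pvEmit l j k := by
  induction l with
  | nil => intro j k acc _; simp [pvALoop, pvEmit]
  | cons b rest ih =>
    intro j k acc hb
    by_cases hl : PySem.Chars.islower b
    · have hj1 : (j + 1) + pvCntL rest ≤ 3905 := by
        have : pvCntL (b :: rest) = pvCntL rest + 1 := by simp [pvCntL, hl]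
        omega
      have hchain := pvChain_agree (j + 1) (by omega)
      cases hIC : IntToChain (((j + 1 : Nat) : Int)) with
      | none => rw [hIC] at hchain; simp at hchain
      | some c =>
        rw [hIC] at hchain
        simp only [Option.map_some, Option.some.injEq] at hchain
        have hcast : (j : Int) + 1 = ((j + 1 : Nat) : Int) := by push_cast; ring
        simp only [pvALoop, pvEmit, hl, if_true, hcast, hIC, hchain]
        rw [ih (j + 1) 1 _ hj1]
        simp
    · have hj' : j + pvCntL rest ≤ 3905 := by
        have : pvCntL (b :: rest) = pvCntL rest := by simp [pvCntL, hl]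
        omega
      simp only [pvALoop, pvEmit, hl, if_false, Bool.false_eq_true]
      rw [ih j (k + 1) _ hj']
      simp

-- B's pure segment list (the accumulator of pvSegLoop peeled off)
def pvSegs : List Char → List Char → List (List Char)
  | [], cur => if cur.isEmpty then [] else [cur]
  | b :: rest, cur =>
    if PySem.Chars.islower b then (cur ++ [b]) :: pvSegs rest []
    else pvSegs rest (cur ++ [b])

theorem pvSegLoop_eq (l : List Char) : ∀ cur segs,
    pvSegLoop l cur segs = segs ++ pvSegs l cur := by
  induction l with
  | nil => intro cur segs; by_cases h : cur.isEmpty <;> simp [pvSegLoop, pvSegs, h]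
  | cons b rest ih =>
    intro cur segs
    by_cases hl : PySem.Chars.islower b <;> simp [pvSegLoop, pvSegs, hl, ih]

-- B's emission over a segment list, starting at chain number j
def pvBEmit : List (List Char) → Nat → List String
  | [], _ => []
  | s :: rest, j =>
    (PySem.List.enumerate s 1).map (fun kb => pvEntry (pvChainId (j : Int)) kb.2 kb.1)
      ++ pvBEmit rest (j + 1)

theorem pvBEmit_flatMap (segs : List (List Char)) : ∀ (j : Nat),
    (PySem.List.enumerate segs (j : Int)).flatMap
      (fun js => (PySem.List.enumerate js.2 1).map (fun kb => pvEntry (pvChainId js.1) kb.2 kb.1))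
    = pvBEmit segs j := by
  induction segs with
  | nil => intro j; simp [pvBEmit, PySem.List.enumerate_nil]
  | cons s rest ih =>
    intro j
    rw [PySem.List.enumerate_cons]
    have : ((j : Int) + 1) = ((j + 1 : Nat) : Int) := by push_cast; ring
    simp only [List.flatMap_cons, this, ih (j + 1), pvBEmit]

theorem pvSeg_entries_append (j : Nat) (cur : List Char) (b : Char) :
    (PySem.List.enumerate (cur ++ [b]) 1).map (fun kb => pvEntry (pvChainId (j : Int)) kb.2 kb.1)
    = (PySem.List.enumerate cur 1).map (fun kb => pvEntry (pvChainId (j : Int)) kb.2 kb.1)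
      ++ [pvEntry (pvChainId (j : Int)) b ((cur.length : Int) + 1)] := by
  rw [PySem.List.enumerate_append]
  simp [PySem.List.enumerate_cons, PySem.List.enumerate_nil, add_comm]

theorem pvBEmit_segs (l : List Char) : ∀ (j : Nat) (cur : List Char),
    pvBEmit (pvSegs l cur) j
    = (PySem.List.enumerate cur 1).map (fun kb => pvEntry (pvChainId (j : Int)) kb.2 kb.1)
      ++ pvEmit l j ((cur.length : Int) + 1) := by
  induction l with
  | nil =>
    intro j cur
    cases hcur : cur.isEmpty
    · simp only [pvSegs, hcur, if_false, Bool.false_eq_true, pvBEmit, pvEmit]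
    · have : cur = [] := by simpa [List.isEmpty_iff] using hcur
      subst this
      simp [pvSegs, pvBEmit, pvEmit, PySem.List.enumerate_nil]
  | cons b rest ih =>
    intro j cur
    by_cases hl : PySem.Chars.islower b
    · simp only [pvSegs, hl, if_true, pvBEmit]
      rw [ih (j + 1) [], pvSeg_entries_append, pvEmit]
      simp [hl, PySem.List.enumerate_nil]
    · simp only [pvSegs, hl, if_false, Bool.false_eq_true]
      rw [ih j (cur ++ [b]), pvSeg_entries_append, pvEmit]
      simp [hl]

-- ===== VERDICT (by name: the statement is the Claim_ definition above) =====
theorem SeqToIdlist_spec : Claim_equal_SeqToIdlist := by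
  intro seq _ hpre
  unfold Spec_SeqToIdlist SeqToIdlist SeqToIdlist_alt
  have h0 := pvChain_agree 0 (by omega)
  cases hIC : IntToChain (((0 : Nat) : Int)) with
  | none => rw [hIC] at h0; simp at h0
  | some c =>
    rw [hIC] at h0
    simp only [Option.map_some, Option.some.injEq] at h0
    have hA := pvALoop_emit seq.toList 0 1 [] (by simpa [pvCntL] using hpre)
    simp only [Nat.cast_zero] at hA h0 hIC
    simp only [h0, hA]
    rw [pvSegLoop_eq, show (0:Int) = ((0:Nat):Int) by rfl, pvBEmit_flatMap]
    simp only [List.nil_append]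
    rw [pvBEmit_segs seq.toList 0 []]
    simp [PySem.List.enumerate_nil]
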